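-- pv_equiv track=rewrite | github.com/Younghyeon-Kim/- | BOJ/별찍기/BOJ_2447_김영현.py | drawing_stars
-- ===== SOURCE A (Python) =====
-- def drawing_stars(stars):
--     # 별을 찍을 리스트를 할당
--     paper = []
--     for i in range(3 * len(stars)):
--         # n이 3으로 나누어 떨어지지 않으면 n의 길이 만큼 공백
--         if i // len(stars) == 1:
--             paper.append(stars[i % len(stars)] + ' ' * len(stars) +stars[i % len(stars)])
--
--         else:
--             paper.append(stars[i % len(stars)] * 3)
--
--     return paper
-- ===== SOURCE B (Python) =====
-- def drawing_stars(stars):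
--     # Build the three bands directly: the top band once, reused for the bottom.
--     n = len(stars)
--     top = [s * 3 for s in stars]
--     mid = [s + ' ' * n + s for s in stars]
--     return top + mid + top
-- ===== Notes on version B (the rewrite author's own statement) =====
-- stated objective: simpler
-- what changed: Replaces the single modular loop over range(3*len) with three named band comprehensions (top/mid/top), computing the top band once and reusing it, eliminating the i//len branch and i%len indexing.
import Mathlib
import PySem

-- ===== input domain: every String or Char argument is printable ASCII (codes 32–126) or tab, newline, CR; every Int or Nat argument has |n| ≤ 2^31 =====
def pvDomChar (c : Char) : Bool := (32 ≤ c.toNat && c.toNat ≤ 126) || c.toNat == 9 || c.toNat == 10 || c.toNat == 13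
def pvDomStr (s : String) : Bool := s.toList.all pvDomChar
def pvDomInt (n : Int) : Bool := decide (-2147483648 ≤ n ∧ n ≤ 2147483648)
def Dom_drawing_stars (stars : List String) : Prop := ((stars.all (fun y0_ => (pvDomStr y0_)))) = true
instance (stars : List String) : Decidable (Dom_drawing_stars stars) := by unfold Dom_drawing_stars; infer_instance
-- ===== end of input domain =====

-- B builds the three bands directly (the top band computed once and reused) instead of A's single modular loop; objective: simpler.

-- ===== PORT A =====
-- i % len(stars) is always a valid index whenever the loop body runs (len > 0 there), so pyGetD's default is never taken.
def drawing_stars (stars : List String) : List String :=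
  (PySem.List.pyRange 0 (3 * (stars.length : Int)) 1).foldl (fun paper i =>
    if PySem.Int.floordiv i (stars.length : Int) = 1 then
      paper ++ [PySem.List.pyGetD stars (PySem.Int.mod i (stars.length : Int)) ""
                ++ String.ofList (List.replicate stars.length ' ')
                ++ PySem.List.pyGetD stars (PySem.Int.mod i (stars.length : Int)) ""]
    else
      paper ++ [PySem.List.pyGetD stars (PySem.Int.mod i (stars.length : Int)) ""
                ++ PySem.List.pyGetD stars (PySem.Int.mod i (stars.length : Int)) ""
                ++ PySem.List.pyGetD stars (PySem.Int.mod i (stars.length : Int)) ""]) []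

-- ===== PORT B =====
def drawing_stars_alt (stars : List String) : List String :=
  let top := stars.map (fun s => s ++ s ++ s)
  let mid := stars.map (fun s => s ++ String.ofList (List.replicate stars.length ' ') ++ s)
  top ++ mid ++ top

-- ===== PRECONDITION & SPEC =====
def Spec_drawing_stars (stars : List String) (out : List String) : Prop := out = drawing_stars_alt stars
instance (stars : List String) (out : List String) : Decidable (Spec_drawing_stars stars out) := by unfold Spec_drawing_stars; infer_instance

-- ===== CLAIM (what is proved, stated in full; the proofs are below) =====
def Claim_equal_drawing_stars : Prop := ∀ (stars : List String), Dom_drawing_stars stars → Spec_drawing_stars stars (drawing_stars stars)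

-- ===== LEMMAS AND PROOFS =====

-- mapping g over elements fetched by index over range(len) is mapping g over the list
theorem map_range_getD {α β : Type} (l : List α) (d : α) (g : α → β) :
    (List.range l.length).map (fun k => g (l.getD k d)) = l.map g := by
  induction l with
  | nil => simp
  | cons a l ih =>
    simp only [List.length_cons, List.range_succ_eq_map, List.map_cons, List.map_map]
    exact congrArg (g a :: ·) (by simpa [Function.comp] using ih)

theorem fd_band {n c k : ℤ} (hn : 0 < n) (hk0 : 0 ≤ k) (hk : k < n) :
    PySem.Int.floordiv (c * n + k) n = c := by
  rw [PySem.Int.floordiv_eq_iff_of_pos hn]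
  constructor <;> nlinarith

theorem mod_band {n c k : ℤ} (hn : 0 < n) (hk0 : 0 ≤ k) (hk : k < n) :
    PySem.Int.mod (c * n + k) n = k := by
  have h := PySem.Int.floordiv_mul_add_mod (c * n + k) n
  rw [fd_band hn hk0 hk] at h
  linarith

-- one band of A's loop collapses to a map over range(n) of F at shifted indices
theorem band_eq {α : Type} (n : ℕ) (F : ℤ → α) (a b : ℤ) (hb : b = a + n) :
    (PySem.List.pyRange a b 1).map F = (List.range n).map (fun k : ℕ => F (a + ↑k)) := by
  subst hb
  rw [PySem.List.pyRange_one, show (a + (n : ℤ) - a).toNat = n by omega, List.map_map]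
  rfl

theorem drawing_stars_spec : Claim_equal_drawing_stars := by
  intro stars _
  unfold Spec_drawing_stars drawing_stars drawing_stars_alt
  rcases Nat.eq_zero_or_pos stars.length with h0 | hpos
  · rw [List.length_eq_zero_iff] at h0
    subst h0
    simp [PySem.List.pyRange]
  · have hn : (0 : ℤ) < (stars.length : ℤ) := by exact_mod_cast hpos
    set n : ℤ := (stars.length : ℤ) with hndef
    set F : ℤ → String := fun i =>
      if PySem.Int.floordiv i n = 1 then
        PySem.List.pyGetD stars (PySem.Int.mod i n) ""
          ++ String.ofList (List.replicate stars.length ' ')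
          ++ PySem.List.pyGetD stars (PySem.Int.mod i n) ""
      else
        PySem.List.pyGetD stars (PySem.Int.mod i n) ""
          ++ PySem.List.pyGetD stars (PySem.Int.mod i n) ""
          ++ PySem.List.pyGetD stars (PySem.Int.mod i n) "" with hF
    have hfun : (fun (paper : List String) (i : ℤ) =>
        if PySem.Int.floordiv i n = 1 then
          paper ++ [PySem.List.pyGetD stars (PySem.Int.mod i n) ""
                    ++ String.ofList (List.replicate stars.length ' ')
                    ++ PySem.List.pyGetD stars (PySem.Int.mod i n) ""]
        else
          paper ++ [PySem.List.pyGetD stars (PySem.Int.mod i n) ""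
                    ++ PySem.List.pyGetD stars (PySem.Int.mod i n) ""
                    ++ PySem.List.pyGetD stars (PySem.Int.mod i n) ""])
        = (fun paper i => paper ++ [F i]) := by
      funext paper i
      by_cases h : PySem.Int.floordiv i n = 1 <;> simp [hF, h]
    rw [hfun, PySem.List.foldl_append_singleton_eq_map, List.nil_append]
    have hsplit : PySem.List.pyRange 0 (3 * n) 1
        = PySem.List.pyRange 0 n 1 ++ (PySem.List.pyRange n (2 * n) 1
            ++ PySem.List.pyRange (2 * n) (3 * n) 1) := by
      rw [← PySem.List.pyRange_one_append n (2*n) (3*n) (by linarith) (by linarith),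
          ← PySem.List.pyRange_one_append 0 n (3*n) (by linarith) (by linarith)]
    have key : ∀ (a b : ℤ) (g : String → String), b = a + stars.length →
        (∀ (k : ℕ), k < stars.length → F (a + k) = g (stars.getD k "")) →
        (PySem.List.pyRange a b 1).map F = stars.map g := by
      intro a b g hb hg
      rw [band_eq stars.length F a b hb,
          List.map_congr_left (fun k hk => hg k (List.mem_range.mp hk))]
      exact map_range_getD stars "" g
    have hknat : ∀ k : ℕ, k < stars.length → (0:ℤ) ≤ (k:ℤ) ∧ (k:ℤ) < n := by
      intro k hk
      exact ⟨Int.natCast_nonneg k, by rw [hndef]; exact_mod_cast hk⟩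
    have b0 : (PySem.List.pyRange 0 n 1).map F = stars.map (fun s => s ++ s ++ s) := by
      apply key 0 n _ (by rw [hndef]; ring)
      intro k hk
      obtain ⟨h1, h2⟩ := hknat k hk
      have hf : PySem.Int.floordiv (k : ℤ) n = 0 := by
        simpa using fd_band (c := 0) hn h1 h2
      have hm : PySem.Int.mod (k : ℤ) n = (k : ℤ) := by
        simpa using mod_band (c := 0) hn h1 h2
      simp [hF, hf, hm, List.getD]
    have b1 : (PySem.List.pyRange n (2 * n) 1).map F
        = stars.map (fun s => s ++ String.ofList (List.replicate stars.length ' ') ++ s) := by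
      apply key n (2 * n) _ (by rw [hndef]; ring)
      intro k hk
      obtain ⟨h1, h2⟩ := hknat k hk
      have hf : PySem.Int.floordiv (n + k) n = 1 := by
        simpa using fd_band (c := 1) hn h1 h2
      have hm : PySem.Int.mod (n + k) n = (k : ℤ) := by
        simpa using mod_band (c := 1) hn h1 h2
      simp [hF, hf, hm, List.getD]
    have b2 : (PySem.List.pyRange (2 * n) (3 * n) 1).map F
        = stars.map (fun s => s ++ s ++ s) := by
      apply key (2 * n) (3 * n) _ (by rw [hndef]; ring)
      intro k hk
      obtain ⟨h1, h2⟩ := hknat k hk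
      have hf : PySem.Int.floordiv (2 * n + k) n = 2 := by
        simpa using fd_band (c := 2) hn h1 h2
      have hm : PySem.Int.mod (2 * n + k) n = (k : ℤ) := by
        simpa using mod_band (c := 2) hn h1 h2
      simp [hF, hf, hm, List.getD]
    rw [hsplit, List.map_append, List.map_append, b0, b1, b2, List.append_assoc]
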